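-- pv_equiv track=rewrite | github.com/TataSatyaPratheek/AlgoToolbox | grouping_points.py | greedy_grouping
-- ===== SOURCE A (Python) =====
-- def greedy_grouping(given_points):
--
-- 	#part one of the solution, sorting the elements monotonically
--
-- 	sort_points = sorted(given_points)
--
-- 	#part two is to actually implement the greedy algo to partition the folks
--   #satisfying the given condition
--
-- 	R =set()
-- 	i = 0
-- 	while i<len(given_points):
-- 		[l, r] = [sort_points[i], sort_points[i]+1]
-- 		R = R.union(set([l,r]))
-- 		i +=1
-- 		while i<len(given_points) and sort_points[i]<=r:
-- 			i+=1
-- 	return sorted(list(R))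
-- ===== SOURCE B (Python) =====
-- def greedy_grouping(given_points):
-- 	# Worklist algorithm: repeatedly take the minimum remaining point, emit its unit
-- 	# interval's endpoints, and filter the worklist down to the points it does not cover.
-- 	pts = sorted(given_points)
-- 	out = []
-- 	while pts:
-- 		x = pts[0]
-- 		out.append(x)
-- 		out.append(x + 1)
-- 		pts = [y for y in pts if y > x + 1]
-- 	return out
-- ===== Notes on version B (the rewrite author's own statement) =====
-- stated objective: alternative
-- what changed: Replaces A's index-driven scan (outer while over positions plus an inner skip loop, accumulating a set that is sorted at the end) by a worklist algorithm: repeatedly take the minimum remaining point, emit its interval endpoints in order, and rebuild the worklist by filtering out every covered point; no indices, no set, no final sort.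
import Mathlib
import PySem

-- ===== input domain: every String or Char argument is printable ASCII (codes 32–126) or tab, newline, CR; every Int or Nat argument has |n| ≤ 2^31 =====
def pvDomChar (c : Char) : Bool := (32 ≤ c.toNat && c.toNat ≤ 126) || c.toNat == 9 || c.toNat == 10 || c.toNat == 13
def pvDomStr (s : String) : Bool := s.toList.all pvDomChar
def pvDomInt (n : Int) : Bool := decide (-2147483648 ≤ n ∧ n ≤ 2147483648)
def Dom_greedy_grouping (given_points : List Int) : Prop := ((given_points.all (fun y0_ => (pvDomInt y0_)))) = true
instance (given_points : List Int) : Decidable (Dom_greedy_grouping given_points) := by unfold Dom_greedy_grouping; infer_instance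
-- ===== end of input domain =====

-- B replaces A's index/while scan with set union and final sort by a worklist algorithm:
-- take the minimum remaining point, emit its endpoints, filter the worklist to uncovered points.


-- ===== PORT A =====
-- inner loop 'while i < len(given_points) and sort_points[i] <= r: i += 1'
-- (the index read is always in range when the test is reached, so pyGetD's default is never used)
def pySkip (sp : List Int) (n : Nat) (r : Int) (i : Nat) : Nat :=
  if h : i < n ∧ PySem.List.pyGetD sp (i : Int) 0 ≤ r then
    pySkip sp n r (i + 1)
  else i
termination_by n - i
decreasing_by omega

-- the outer index never decreases across the inner skip loop (termination of the outer loop)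
theorem le_pySkip (sp : List Int) (n : Nat) (r : Int) (i : Nat) : i ≤ pySkip sp n r i := by
  rw [pySkip]
  split
  · exact le_trans (Nat.le_succ i) (le_pySkip sp n r (i + 1))
  · exact le_refl i
termination_by n - i
decreasing_by omega

-- outer 'while i < len(given_points)' loop, accumulating the set R
def pyOuter (sp : List Int) (n : Nat) (i : Nat) (R : PySem.Set Int) : PySem.Set Int :=
  if h : i < n then
    pyOuter sp n (pySkip sp n (PySem.List.pyGetD sp (i : Int) 0 + 1) (i + 1))
      (PySem.Set.union R (PySem.Set.ofList
        [PySem.List.pyGetD sp (i : Int) 0, PySem.List.pyGetD sp (i : Int) 0 + 1]))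
  else R
termination_by n - i
decreasing_by
  have := le_pySkip sp n (PySem.List.pyGetD sp (i : Int) 0 + 1) (i + 1)
  omega

def greedy_grouping (given_points : List Int) : List Int :=
  PySem.List.sorted
    (pyOuter (PySem.List.sorted given_points (fun x => x)) given_points.length 0 PySem.Set.empty)
    (fun x => x)

-- ===== PORT B =====
-- the filtered worklist shrinks: the head itself is never kept by its own filter
theorem bFilter_lt (x : Int) (t : List Int) :
    ((x :: t).filter (fun y => decide (x + 1 < y))).length < (x :: t).length := by
  have hx : (decide (x + 1 < x)) = false := by simp only [decide_eq_false_iff_not]; omega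
  rw [List.filter_cons, hx]
  have := t.length_filter_le (fun y => decide (x + 1 < y))
  simp only [Bool.false_eq_true, if_false, List.length_cons]
  omega

-- 'while pts: x = pts[0]; out += [x, x+1]; pts = [y for y in pts if y > x+1]'
def bLoop (pts : List Int) (out : List Int) : List Int :=
  match pts with
  | [] => out
  | x :: t => bLoop ((x :: t).filter (fun y => decide (x + 1 < y))) (out ++ [x, x + 1])
termination_by pts.length
decreasing_by exact bFilter_lt x t

def greedy_grouping_alt (given_points : List Int) : List Int :=
  bLoop (PySem.List.sorted given_points (fun x => x)) []

-- ===== PRECONDITION & SPEC =====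
def Spec_greedy_grouping (given_points : List Int) (out : List Int) : Prop := out = greedy_grouping_alt given_points
instance (given_points : List Int) (out : List Int) : Decidable (Spec_greedy_grouping given_points out) := by unfold Spec_greedy_grouping; infer_instance

-- ===== CLAIM (what is proved, stated in full; the proofs are below) =====
def Claim_equal_greedy_grouping : Prop := ∀ (given_points : List Int), Dom_greedy_grouping given_points → Spec_greedy_grouping given_points (greedy_grouping given_points)

-- ===== LEMMAS AND PROOFS =====

-- the common value of both programs on an (already sorted) point list
def eSpec : List Int → List Int
  | [] => []
  | x :: xs => x :: (x + 1) :: eSpec (xs.dropWhile (fun y => decide (y ≤ x + 1)))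
termination_by xs => xs.length
decreasing_by
  have := (List.dropWhile_sublist (l := xs) (fun y => decide (y ≤ x + 1))).length_le
  simp; omega

theorem dropWhile_gt {r : Int} {xs : List Int} (h : xs.Pairwise (· ≤ ·)) :
    ∀ b ∈ xs.dropWhile (fun y => decide (y ≤ r)), r < b := by
  induction xs with
  | nil => simp
  | cons x t ih =>
    rcases List.pairwise_cons.mp h with ⟨hx, ht⟩
    by_cases hxr : x ≤ r
    · simpa [List.dropWhile, hxr] using ih ht
    · intro b hb
      rw [List.dropWhile_cons_of_neg (by simpa using hxr)] at hb
      rcases List.mem_cons.mp hb with rfl | hb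
      · omega
      · have := hx b hb; omega

theorem eSpec_mem_gt {xs : List Int} (h : xs.Pairwise (· ≤ ·)) :
    ∀ (c : Int), (∀ y ∈ xs, c < y) → ∀ b ∈ eSpec xs, c < b := by
  induction xs using eSpec.induct with
  | case1 => simp [eSpec]
  | case2 x t ih =>
    intro c hc b hb
    have ht : t.Pairwise (· ≤ ·) := (List.pairwise_cons.mp h).2
    rw [eSpec] at hb
    rcases List.mem_cons.mp hb with rfl | hb
    · exact hc b (by simp)
    rcases List.mem_cons.mp hb with rfl | hb
    · have := hc x (by simp); omega
    · have hdw : (t.dropWhile (fun y => decide (y ≤ x + 1))).Pairwise (· ≤ ·) :=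
        ht.sublist (List.dropWhile_sublist _)
      refine ih hdw c ?_ b hb
      intro y hy
      have h1 := dropWhile_gt ht y hy
      have := hc x (by simp); omega

theorem eSpec_pairwise_lt {xs : List Int} (h : xs.Pairwise (· ≤ ·)) :
    (eSpec xs).Pairwise (· < ·) := by
  induction xs using eSpec.induct with
  | case1 => simp [eSpec]
  | case2 x t ih =>
    have ht : t.Pairwise (· ≤ ·) := (List.pairwise_cons.mp h).2
    have hdw : (t.dropWhile (fun y => decide (y ≤ x + 1))).Pairwise (· ≤ ·) :=
      ht.sublist (List.dropWhile_sublist _)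
    have hgt : ∀ b ∈ eSpec (t.dropWhile (fun y => decide (y ≤ x + 1))), x + 1 < b :=
      eSpec_mem_gt hdw (x + 1) (fun y hy => dropWhile_gt ht y hy)
    rw [eSpec]
    refine List.pairwise_cons.mpr ⟨?_, List.pairwise_cons.mpr ⟨hgt, ih hdw⟩⟩
    intro b hb
    rcases List.mem_cons.mp hb with rfl | hb
    · omega
    · have := hgt b hb; omega

theorem union_fresh (R : PySem.Set Int) (l : Int) (hl : l ∉ R) (hr : l + 1 ∉ R) :
    PySem.Set.union R (PySem.Set.ofList [l, l + 1]) = R ++ [l, l + 1] := by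
  have hne : l + 1 ≠ l := by omega
  simp [PySem.Set.union, PySem.Set.update, PySem.Set.ofList, PySem.Set.add, PySem.Set.contains,
    List.foldl, hl, hr, hne]

theorem skip_drop (sp : List Int) (r : Int) :
    ∀ i, i ≤ sp.length →
      pySkip sp sp.length r i ≤ sp.length ∧
      sp.drop (pySkip sp sp.length r i) = (sp.drop i).dropWhile (fun y => decide (y ≤ r)) := by
  intro i
  induction hn : sp.length - i using Nat.strong_induction_on generalizing i with
  | _ n ih =>
    intro hi
    rw [pySkip]
    split
    · next h =>
      have hlt : i < sp.length := h.1
      have hget : PySem.List.pyGetD sp (i : Int) 0 = sp[i] :=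
        PySem.List.pyGetD_eq_getElem sp 0 (by omega) (by exact_mod_cast hlt)
      have hdrop : sp.drop i = sp[i] :: sp.drop (i + 1) := List.drop_eq_getElem_cons hlt
      have := ih (sp.length - (i + 1)) (by omega) (i + 1) rfl (by omega)
      refine ⟨this.1, ?_⟩
      rw [this.2, hdrop, List.dropWhile_cons_of_pos (by simpa using hget ▸ h.2)]
    · next h =>
      rcases Nat.lt_or_ge i sp.length with hlt | hge
      · have hget : PySem.List.pyGetD sp (i : Int) 0 = sp[i] :=
          PySem.List.pyGetD_eq_getElem sp 0 (by omega) (by exact_mod_cast hlt)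
        have hgt : ¬ (PySem.List.pyGetD sp (i : Int) 0 ≤ r) := fun hc => h ⟨hlt, hc⟩
        have hdrop : sp.drop i = sp[i] :: sp.drop (i + 1) := List.drop_eq_getElem_cons hlt
        refine ⟨hi, ?_⟩
        rw [hdrop, List.dropWhile_cons_of_neg (by simp only [decide_eq_true_eq]; rw [← hget]; omega)]
      · have hi' : i = sp.length := by omega
        refine ⟨hi, ?_⟩
        simp [hi', List.drop_length]

theorem outer_eq (sp : List Int) (hs : sp.Pairwise (· ≤ ·)) :
    ∀ i R, i ≤ sp.length → (∀ a ∈ R, ∀ b ∈ sp.drop i, a < b) →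
      pyOuter sp sp.length i R = R ++ eSpec (sp.drop i) := by
  intro i
  induction hn : sp.length - i using Nat.strong_induction_on generalizing i with
  | _ n ih =>
    intro R hi hfresh
    rw [pyOuter]
    split
    · next hlt =>
      have hget : PySem.List.pyGetD sp (i : Int) 0 = sp[i] :=
        PySem.List.pyGetD_eq_getElem sp 0 (by omega) (by exact_mod_cast hlt)
      set l := sp[i] with hl
      have hdrop : sp.drop i = l :: sp.drop (i + 1) := List.drop_eq_getElem_cons hlt
      have hmeml : l ∈ sp.drop i := by rw [hdrop]; simp
      have hfl : l ∉ R := fun hc => absurd (hfresh l hc l hmeml) (by omega)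
      have hfr : l + 1 ∉ R := fun hc => absurd (hfresh (l + 1) hc l hmeml) (by omega)
      have hskip := skip_drop sp (l + 1) (i + 1) (by omega)
      have hskip_ge := le_pySkip sp sp.length (l + 1) (i + 1)
      have htail : (sp.drop (i + 1)).Pairwise (· ≤ ·) := hs.sublist (List.drop_sublist _ _)
      have hfresh' : ∀ a ∈ R ++ [l, l + 1],
          ∀ b ∈ sp.drop (pySkip sp sp.length (l + 1) (i + 1)), a < b := by
        intro a ha b hb
        rw [hskip.2] at hb
        have hbgt : l + 1 < b := dropWhile_gt htail b hb
        rcases List.mem_append.mp ha with ha | ha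
        · have := hfresh a ha l hmeml; omega
        · simp at ha; omega
      have hrec := ih (sp.length - pySkip sp sp.length (l + 1) (i + 1)) (by omega)
        (pySkip sp sp.length (l + 1) (i + 1)) rfl (R ++ [l, l + 1]) hskip.1 hfresh'
      rw [hget, union_fresh R l hfl hfr, hrec, hskip.2, hdrop]
      rw [eSpec]
      simp
    · next hge =>
      have : i = sp.length := by omega
      simp [this, List.drop_length, eSpec]

-- on a sorted list, B's covered-point filter keeps exactly the dropWhile suffix
theorem filter_eq_dropWhile {r : Int} {t : List Int} (h : t.Pairwise (· ≤ ·)) :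
    t.filter (fun y => decide (r < y)) = t.dropWhile (fun y => decide (y ≤ r)) := by
  induction t with
  | nil => simp
  | cons y ys ih =>
    rcases List.pairwise_cons.mp h with ⟨hy, hys⟩
    by_cases hyr : y ≤ r
    · rw [List.filter_cons_of_neg (by simp; omega),
        List.dropWhile_cons_of_pos (by simpa using hyr)]
      exact ih hys
    · rw [List.filter_cons_of_pos (by simp; omega),
        List.dropWhile_cons_of_neg (by simpa using hyr)]
      have : ys.filter (fun y => decide (r < y)) = ys := by
        apply List.filter_eq_self.mpr
        intro z hz
        have := hy z hz
        simp; omega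
      rw [this]

theorem bLoop_eq (pts : List Int) (hs : pts.Pairwise (· ≤ ·)) :
    ∀ out, bLoop pts out = out ++ eSpec pts := by
  induction hn : pts.length using Nat.strong_induction_on generalizing pts with
  | _ n ih =>
    intro out
    match pts with
    | [] => simp [bLoop, eSpec]
    | x :: t =>
      rcases List.pairwise_cons.mp hs with ⟨hx, ht⟩
      have hfx : ((x :: t).filter (fun y => decide (x + 1 < y)))
          = t.dropWhile (fun y => decide (y ≤ x + 1)) := by
        rw [List.filter_cons_of_neg (by simp only [decide_eq_true_eq, not_lt]; omega)]
        exact filter_eq_dropWhile ht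
      have hdw : (t.dropWhile (fun y => decide (y ≤ x + 1))).Pairwise (· ≤ ·) :=
        ht.sublist (List.dropWhile_sublist _)
      have hlen : (t.dropWhile (fun y => decide (y ≤ x + 1))).length < n := by
        have := (List.dropWhile_sublist (l := t) (fun y => decide (y ≤ x + 1))).length_le
        simp at hn; omega
      rw [bLoop, hfx, ih _ hlen _ hdw rfl, eSpec]
      simp

theorem alt_eq_eSpec (gp : List Int) :
    greedy_grouping_alt gp = eSpec (PySem.List.sorted gp (fun x => x)) := by
  unfold greedy_grouping_alt
  have hs : (PySem.List.sorted gp (fun x => x)).Pairwise (· ≤ ·) :=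
    PySem.List.sorted_pairwise gp (fun x => x)
  rw [bLoop_eq _ hs []]
  simp

theorem a_eq_eSpec (gp : List Int) :
    greedy_grouping gp = eSpec (PySem.List.sorted gp (fun x => x)) := by
  unfold greedy_grouping
  have hs : (PySem.List.sorted gp (fun x => x)).Pairwise (· ≤ ·) :=
    PySem.List.sorted_pairwise gp (fun x => x)
  have hlen : gp.length = (PySem.List.sorted gp (fun x => x)).length :=
    ((PySem.List.sorted_perm gp (fun x => x) false).length_eq).symm
  rw [hlen, outer_eq _ hs 0 PySem.Set.empty (by omega) (by simp [PySem.Set.empty])]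
  simp only [List.drop_zero, PySem.Set.empty, List.nil_append]
  exact PySem.List.sorted_eq_self_of_pairwise _ _ ((eSpec_pairwise_lt hs).imp (fun h => le_of_lt h))

-- ===== VERDICT (by name: the statement is the Claim_ definition above) =====
theorem greedy_grouping_spec : Claim_equal_greedy_grouping := by
  intro gp _
  unfold Spec_greedy_grouping
  rw [a_eq_eSpec, alt_eq_eSpec]
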